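-- pv_equiv track=rewrite | github.com/kwanggyo/Algorithm | Study/string/Programmers_2019겨울인턴십_불량사용자.py | solution
-- ===== SOURCE A (Python) =====
-- def comb(N, R):
--     if N < R:
--         return N
--     else:
--         mul = 1
--         div = 1
--         for i in range(N, N - R, -1):
--             mul *= i
--         for j in range(1, R + 1):
--             div *= j
--         return mul // div
--
-- def solution(user_id, banned_id):
--     answer = 0
--     # string + 조합
--     # banned_id를 하나씩 꺼내서 글자수를 비교
--     # 글자수가 다르면 pass 같으면 비교 시작
--     # 밴해야하는 id라면 list에 저장
--     # 마지막에 len(list)의 개수에서 len(banned_id)의 개수의 조합을 구함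
--     # banned_id의 개수가 더 많으면 그냥 len(list)가 답
--     ans_set = set()
--     ban_dict = {}
--     user_dict = {}
--     for ban in banned_id:
--         B = len(ban)  # banned_id에 글자수에 해당하는 id가 몇개인지 계산
--         if B not in ban_dict:
--             ban_dict[B] = 1
--         else:
--             ban_dict[B] += 1
--         for user in user_id:
--             if len(ban) == len(user):
--                 flag = True
--                 for i in range(len(ban)):
--                     if ban[i] != '*':
--                         if ban[i] == user[i]:
--                             continue
--                         else:
--                             flag = False
--                             break
--                 if flag:
--                     ans_set.add(user)
--
--     for ans in ans_set:  # 해당하는 user_id의 글자수를 key로 하는 dict 생성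
--         N = len(ans)
--         if N not in user_dict:
--             user_dict[N] = 1
--         else:
--             user_dict[N] += 1
--
--     answer = 1
--     if user_dict:
--         for key in user_dict.keys():
--             answer *= comb(user_dict[key], ban_dict[key])
--     return answer
-- ===== SOURCE B (Python) =====
-- def comb(N, R):
--     if N < R:
--         return N
--     else:
--         mul = 1
--         div = 1
--         for i in range(N, N - R, -1):
--             mul *= i
--         for j in range(1, R + 1):
--             div *= j
--         return mul // div
--
--
-- def solution(user_id, banned_id):
--     # group both inputs by string length, then one fused pass per banned length
--     ban_by_len = {}
--     for b in banned_id: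
--         L = len(b)
--         ban_by_len[L] = ban_by_len.get(L, []) + [b]
--     users_by_len = {}
--     for u in user_id:
--         L = len(u)
--         users_by_len[L] = users_by_len.get(L, []) + [u]
--     answer = 1
--     for length, pats in ban_by_len.items():
--         matched = {u for u in users_by_len.get(length, [])
--                    if any(all(pc == '*' or pc == uc for pc, uc in zip(p, u))
--                           for p in pats)}
--         if matched:
--             answer *= comb(len(matched), len(pats))
--     return answer
-- ===== Notes on version B (the rewrite author's own statement) =====
-- stated objective: faster
-- what changed: Instead of A's nested loop comparing every banned pattern against every user (plus a separate set pass and two counter dicts), B groups patterns and users by string length once and, per banned length, matches only the same-length bucket with a zip-based comparison, multiplying the answer in the same fused pass (comb helper kept identical, including its N<R branch).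
import Mathlib
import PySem

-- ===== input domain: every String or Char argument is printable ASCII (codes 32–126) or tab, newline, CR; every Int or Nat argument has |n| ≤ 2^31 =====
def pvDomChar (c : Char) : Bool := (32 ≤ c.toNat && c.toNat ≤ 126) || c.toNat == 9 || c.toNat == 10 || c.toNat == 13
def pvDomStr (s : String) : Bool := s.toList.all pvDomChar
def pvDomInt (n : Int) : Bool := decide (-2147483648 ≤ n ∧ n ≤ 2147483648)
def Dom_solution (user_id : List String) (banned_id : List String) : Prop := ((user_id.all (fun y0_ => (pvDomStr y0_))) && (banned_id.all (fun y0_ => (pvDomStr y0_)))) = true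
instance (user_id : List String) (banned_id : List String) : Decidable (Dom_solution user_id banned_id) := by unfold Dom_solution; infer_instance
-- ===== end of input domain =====

-- B groups patterns and users by string length and, per banned length, matches only the
-- same-length bucket in one fused pass, instead of A's all-pairs nested loops plus two
-- separate counting passes; return value only (neither program mutates its arguments).

-- ===== PORT A =====
-- comb helper, shared verbatim by both Python versions (including its N < R branch)
def pyComb (N R : Int) : Int :=
  if N < R then N
  else
    let mul := (PySem.List.pyRange N (N - R) (-1)).foldl (fun acc i => acc * i) 1
    let div := (PySem.List.pyRange 1 (R + 1) 1).foldl (fun acc j => acc * j) 1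
    PySem.Int.floordiv mul div

-- A's inner 'for i in range(len(ban))' flag loop with break; called only when
-- len(ban) == len(user), so the getD defaults are never read (u[i] never raises)
def flagLoop (b u : List Char) (i : Nat) : Bool :=
  if _h : i < b.length then
    if b.getD i ' ' ≠ '*' then
      if b.getD i ' ' = u.getD i ' ' then flagLoop b u (i + 1) else false
    else flagLoop b u (i + 1)
  else true
termination_by b.length - i

def solution (user_id : List String) (banned_id : List String) : Int :=
  let st := banned_id.foldl
    (fun (st : PySem.Dict Int Int × PySem.Set String) ban =>
      ((if st.1.contains (PySem.Str.len ban) = false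
          then st.1.insert (PySem.Str.len ban) 1
          else st.1.modify (PySem.Str.len ban) 0 (· + 1)),
       user_id.foldl (fun s user =>
          if PySem.Str.len ban == PySem.Str.len user then
            (if flagLoop ban.toList user.toList 0 then PySem.Set.add s user else s)
          else s) st.2))
    (PySem.Dict.empty, PySem.Set.empty)
  let ban_dict := st.1
  let ans_set := st.2
  let user_dict : PySem.Dict Int Int := ans_set.foldl
    (fun d ans =>
      if d.contains (PySem.Str.len ans) = false
        then d.insert (PySem.Str.len ans) 1
        else d.modify (PySem.Str.len ans) 0 (· + 1))
    PySem.Dict.empty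
  -- ban_dict[key] is always present (every answer length is a banned length): getD is exact
  if user_dict.size ≠ 0 then
    user_dict.keys.foldl (fun answer key =>
      answer * pyComb (user_dict.getD key 0) (ban_dict.getD key 0)) 1
  else 1

-- ===== PORT B =====
def matchPat (p u : String) : Bool :=
  (p.toList.zip u.toList).all (fun pc => pc.1 == '*' || pc.1 == pc.2)

def solution_alt (user_id : List String) (banned_id : List String) : Int :=
  let ban_by_len : PySem.Dict Int (List String) :=
    banned_id.foldl (fun d b => d.modify (PySem.Str.len b) [] (· ++ [b])) PySem.Dict.empty
  let users_by_len : PySem.Dict Int (List String) :=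
    user_id.foldl (fun d u => d.modify (PySem.Str.len u) [] (· ++ [u])) PySem.Dict.empty
  ban_by_len.items.foldl
    (fun answer lp =>
      let matched : PySem.Set String :=
        PySem.Set.ofList ((users_by_len.getD lp.1 []).filter
          (fun u => lp.2.any (fun p => matchPat p u)))
      if matched.isEmpty then answer
      else answer * pyComb ((matched.length : Nat) : Int) ((lp.2.length : Nat) : Int)) 1

-- ===== PRECONDITION & SPEC =====
def Spec_solution (user_id : List String) (banned_id : List String) (out : Int) : Prop := out = solution_alt user_id banned_id
instance (user_id : List String) (banned_id : List String) (out : Int) : Decidable (Spec_solution user_id banned_id out) := by unfold Spec_solution; infer_instance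

-- ===== CLAIM (what is proved, stated in full; the proofs are below) =====
def Claim_equal_solution : Prop := ∀ (user_id : List String) (banned_id : List String), Dom_solution user_id banned_id → Spec_solution user_id banned_id (solution user_id banned_id)

-- ===== LEMMAS AND PROOFS =====

-- the joint matching condition used by A: equal length and the flag loop
def condA (b u : String) : Bool :=
  (PySem.Str.len b == PySem.Str.len u) && flagLoop b.toList u.toList 0

-- A's ans_set as a fold of set-updates
def ansS (user_id : List String) (banned : List String) : PySem.Set String :=
  banned.foldl (fun s ban => PySem.Set.update s (user_id.filter (fun x => condA ban x)))
    PySem.Set.empty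

-- B's bucket of banned patterns of length L
def patsL (banned : List String) (L : Int) : List String :=
  banned.filter (fun b => PySem.Str.len b == L)

-- B's matched set of users for length L
def musers (user_id : List String) (banned : List String) (L : Int) : PySem.Set String :=
  PySem.Set.ofList ((user_id.filter (fun u => PySem.Str.len u == L)).filter
    (fun u => (patsL banned L).any (fun p => matchPat p u)))

lemma flag_eq (b u : List Char) (hlen : b.length = u.length) :
    ∀ n i, b.length - i = n →
      flagLoop b u i = ((b.drop i).zip (u.drop i)).all (fun pc => pc.1 == '*' || pc.1 == pc.2) := by
  intro n
  induction n with
  | zero =>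
    intro i h
    rw [flagLoop, dif_neg (by omega), List.drop_eq_nil_of_le (by omega)]
    simp
  | succ n ih =>
    intro i h
    have hi : i < b.length := by omega
    have hiu : i < u.length := by omega
    rw [flagLoop, dif_pos hi]
    rw [List.drop_eq_getElem_cons hi, List.drop_eq_getElem_cons hiu]
    rw [List.zip_cons_cons, List.all_cons]
    rw [List.getD_eq_getElem b ' ' hi, List.getD_eq_getElem u ' ' hiu]
    rw [ih (i + 1) (by omega)]
    by_cases h1 : b[i] = '*'
    · simp [h1]
    · by_cases h2 : b[i] = u[i] <;> simp [h1, h2]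

lemma condA_iff (b u : String) :
    condA b u = true ↔ (PySem.Str.len b = PySem.Str.len u ∧ matchPat b u = true) := by
  unfold condA
  rw [Bool.and_eq_true, beq_iff_eq]
  constructor
  · rintro ⟨h1, h2⟩
    have hlen : b.toList.length = u.toList.length := by
      have := h1; rw [PySem.Str.len_eq, PySem.Str.len_eq] at this; exact_mod_cast this
    have key : flagLoop b.toList u.toList 0 = matchPat b u := by
      rw [flag_eq b.toList u.toList hlen _ 0 rfl]; simp [matchPat]
    exact ⟨h1, key ▸ h2⟩
  · rintro ⟨h1, h2⟩
    have hlen : b.toList.length = u.toList.length := by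
      have := h1; rw [PySem.Str.len_eq, PySem.Str.len_eq] at this; exact_mod_cast this
    have key : flagLoop b.toList u.toList 0 = matchPat b u := by
      rw [flag_eq b.toList u.toList hlen _ 0 rfl]; simp [matchPat]
    exact ⟨h1, key.symm ▸ h2⟩

lemma mem_ansFold (user_id : List String) (banned : List String) (s : PySem.Set String) (u : String) :
    u ∈ banned.foldl (fun s ban => PySem.Set.update s (user_id.filter (fun x => condA ban x))) s ↔
      u ∈ s ∨ (u ∈ user_id ∧ ∃ b ∈ banned, condA b u = true) := by
  induction banned generalizing s with
  | nil => simp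
  | cons b t ih =>
    rw [List.foldl_cons, ih]
    rw [PySem.Set.mem_update]
    simp only [List.mem_filter, List.mem_cons]
    constructor
    · rintro ((h | ⟨hu, hc⟩) | ⟨hu, b', hb, hc⟩)
      · exact Or.inl h
      · exact Or.inr ⟨hu, b, Or.inl rfl, hc⟩
      · exact Or.inr ⟨hu, b', Or.inr hb, hc⟩
    · rintro (h | ⟨hu, b', (rfl | hb), hc⟩)
      · exact Or.inl (Or.inl h)
      · exact Or.inl (Or.inr ⟨hu, hc⟩)
      · exact Or.inr ⟨hu, b', hb, hc⟩

lemma nodup_ansFold (user_id : List String) (banned : List String) (s : PySem.Set String)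
    (hs : s.Nodup) :
    (banned.foldl (fun s ban => PySem.Set.update s (user_id.filter (fun x => condA ban x))) s).Nodup := by
  induction banned generalizing s with
  | nil => exact hs
  | cons b t ih =>
    rw [List.foldl_cons]
    exact ih _ (PySem.Set.nodup_update _ _ hs)

lemma mem_ansS (user_id banned : List String) (u : String) :
    u ∈ ansS user_id banned ↔ u ∈ user_id ∧ ∃ b ∈ banned, condA b u = true := by
  unfold ansS
  rw [mem_ansFold]
  simp [PySem.Set.empty]

lemma mem_musers (user_id banned : List String) (L : Int) (u : String) :
    u ∈ musers user_id banned L ↔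
      u ∈ user_id ∧ PySem.Str.len u = L ∧ ∃ b ∈ banned, PySem.Str.len b = L ∧ matchPat b u = true := by
  unfold musers patsL
  rw [PySem.Set.mem_ofList]
  simp only [List.mem_filter, List.any_eq_true, beq_iff_eq]
  tauto

lemma counter_step (d : PySem.Dict Int Int) (k : Int) :
    (if d.contains k = false then d.insert k 1 else d.modify k 0 (· + 1)) =
      d.modify k 0 (· + 1) := by
  by_cases h : d.contains k
  · simp [h]
  · rw [Bool.not_eq_true] at h
    unfold PySem.Dict.modify
    rw [PySem.Dict.getD_of_not_contains d 0 h]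
    simp [h]

lemma foldl_mul {α : Type} (g : α → Int) (l : List α) (a : Int) :
    l.foldl (fun acc x => acc * g x) a = a * (l.map g).prod := by
  induction l generalizing a with
  | nil => simp
  | cons x t ih => simp [ih, mul_assoc]

-- counts agree: distinct matched users of length L counted by A = by B
lemma count_eq (user_id banned : List String) (L : Int) :
    List.count L ((ansS user_id banned).map PySem.Str.len) = (musers user_id banned L).length := by
  have hA : ((ansS user_id banned).filter (fun u => PySem.Str.len u == L)).Nodup := by
    apply List.Nodup.filter
    exact nodup_ansFold user_id banned PySem.Set.empty (List.nodup_nil)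
  have hB : (musers user_id banned L).Nodup := PySem.Set.nodup_ofList _
  rw [List.count_eq_countP, List.countP_map, List.countP_eq_length_filter]
  simp only [Function.comp_def]
  apply List.Perm.length_eq
  rw [List.perm_ext_iff_of_nodup hA hB]
  intro u
  rw [List.mem_filter, mem_ansS, mem_musers, beq_iff_eq]
  constructor
  · rintro ⟨⟨hu, b, hb, hc⟩, hl⟩
    obtain ⟨hbl, hm⟩ := (condA_iff b u).mp hc
    exact ⟨hu, hl, b, hb, hbl.trans hl, hm⟩
  · rintro ⟨hu, hl, b, hb, hbl, hm⟩
    exact ⟨⟨hu, b, hb, (condA_iff b u).mpr ⟨hbl.trans hl.symm, hm⟩⟩, hl⟩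

-- banned counts agree
lemma bancount_eq (banned : List String) (L : Int) :
    List.count L (banned.map PySem.Str.len) = (patsL banned L).length := by
  unfold patsL
  rw [List.count_eq_countP, List.countP_map, List.countP_eq_length_filter]
  simp only [Function.comp_def]

-- A's whole computation in closed form
lemma solA (user_id banned : List String) :
    solution user_id banned =
      (PySem.Set.ofList ((ansS user_id banned).map PySem.Str.len)).foldl
        (fun a L => a * pyComb ((List.count L ((ansS user_id banned).map PySem.Str.len) : Nat) : Int)
                              ((List.count L (banned.map PySem.Str.len) : Nat) : Int)) 1 := by
  have hinner : ∀ (acc : PySem.Set String) (ban : String),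
      user_id.foldl (fun s user =>
        if PySem.Str.len ban == PySem.Str.len user then
          (if flagLoop ban.toList user.toList 0 then PySem.Set.add s user else s)
        else s) acc
      = PySem.Set.update acc (user_id.filter (fun x => condA ban x)) := by
    intro acc ban
    have h1 : ∀ (s : PySem.Set String), ∀ user ∈ user_id,
        (if PySem.Str.len ban == PySem.Str.len user then
          (if flagLoop ban.toList user.toList 0 then PySem.Set.add s user else s)
        else s)
        = if condA ban user = true then PySem.Set.add s user else s := by
      intro s user _
      unfold condA
      by_cases hb1 : (PySem.Str.len ban == PySem.Str.len user) = true <;>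
        by_cases hb2 : flagLoop ban.toList user.toList 0 = true <;> simp [hb2]
    rw [PySem.List.foldl_congr_mem user_id _ _ acc (fun a x hx => h1 a x hx)]
    rw [PySem.List.foldl_if_eq_foldl_filter (fun x => condA ban x) PySem.Set.add user_id acc]
    rfl
  have hcnt : ∀ (l : List String) (d : PySem.Dict Int Int),
      l.foldl (fun d x =>
        if d.contains (PySem.Str.len x) = false then d.insert (PySem.Str.len x) 1
        else d.modify (PySem.Str.len x) 0 (· + 1)) d
      = (l.map PySem.Str.len).foldl (fun d k => d.modify k 0 (· + 1)) d := by
    intro l d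
    rw [List.foldl_map]
    exact PySem.List.foldl_congr_mem l _ _ d (fun acc x _ => counter_step acc (PySem.Str.len x))
  simp only [solution]
  rw [PySem.List.foldl_prod_mk
      (f := fun (d : PySem.Dict Int Int) (ban : String) =>
        if d.contains (PySem.Str.len ban) = false then d.insert (PySem.Str.len ban) 1
        else d.modify (PySem.Str.len ban) 0 (· + 1))
      (g := fun (s : PySem.Set String) (ban : String) =>
        user_id.foldl (fun s user =>
          if PySem.Str.len ban == PySem.Str.len user then
            (if flagLoop ban.toList user.toList 0 then PySem.Set.add s user else s)
          else s) s)]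
  simp only
  rw [PySem.List.foldl_congr_mem banned _ _ PySem.Set.empty (fun acc x _ => hinner acc x)]
  have hans : banned.foldl (fun s ban => PySem.Set.update s (List.filter (fun x => condA ban x) user_id))
      PySem.Set.empty = ansS user_id banned := rfl
  rw [hans, hcnt, hcnt]
  rw [← PySem.Dict.counter_eq_foldl, ← PySem.Dict.counter_eq_foldl]
  have hsize : ∀ (d : PySem.Dict Int Int) (f : Int → Int → Int),
      (if d.size ≠ 0 then d.keys.foldl (fun a k => a * f k (0 : Int)) 1 else 1)
      = d.keys.foldl (fun a k => a * f k 0) 1 := by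
    intro d f
    by_cases h : d.size = 0
    · have hitems : d.items = [] := List.length_eq_zero_iff.mp h
      have hkeys : d.keys = [] := by simp [PySem.Dict.keys, hitems]
      simp [h, hkeys]
    · simp [h]
  by_cases h : (PySem.Dict.counter ((ansS user_id banned).map PySem.Str.len)).size = 0
  · have hitems := List.length_eq_zero_iff.mp h
    have hkeys : (PySem.Dict.counter ((ansS user_id banned).map PySem.Str.len)).keys = [] := by
      simp [PySem.Dict.keys, hitems]
    rw [PySem.Dict.keys_counter] at hkeys
    simp [h, hkeys]
  · simp only [h, ne_eq, not_false_iff, if_pos]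
    rw [PySem.Dict.keys_counter]
    simp only [PySem.Dict.getD_counter]

-- B's whole computation in closed form
lemma solB (user_id banned : List String) :
    solution_alt user_id banned =
      (PySem.Set.ofList (banned.map PySem.Str.len)).foldl
        (fun a L => if (musers user_id banned L).isEmpty then a
                    else a * pyComb (((musers user_id banned L).length : Nat) : Int)
                                    (((patsL banned L).length : Nat) : Int)) 1 := by
  have hgrp : ∀ (l : List String),
      l.foldl (fun d b => d.modify (PySem.Str.len b) [] (· ++ [b])) PySem.Dict.empty
      = (l.map (fun b => (PySem.Str.len b, b))).foldl
          (fun d p => d.modify p.1 [] (· ++ [p.2])) PySem.Dict.empty := by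
    intro l; rw [List.foldl_map]
  have hget : ∀ (l : List String) (L : Int),
      (l.foldl (fun d b => d.modify (PySem.Str.len b) [] (· ++ [b])) PySem.Dict.empty).getD L []
      = l.filter (fun b => PySem.Str.len b == L) := by
    intro l L
    rw [hgrp, PySem.Dict.getD_foldl_modify_append, PySem.Dict.getD_empty]
    rw [List.filter_map]
    simp [Function.comp_def, List.map_map]
  have hkeys : (banned.foldl (fun d b => d.modify (PySem.Str.len b) [] (· ++ [b]))
        PySem.Dict.empty).keys = PySem.Set.ofList (banned.map PySem.Str.len) := by
    rw [PySem.Dict.keys_foldl_modify_key banned (fun b => PySem.Str.len b) []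
      (fun _ b v => v ++ [b]) PySem.Dict.empty]
    rw [PySem.Dict.keys_empty, PySem.Set.update_nil_left]
  have hnd : (banned.foldl (fun d b => d.modify (PySem.Str.len b) [] (· ++ [b]))
        PySem.Dict.empty).keys.Nodup := by
    apply PySem.Dict.nodup_keys_foldl_modify_key
    rw [PySem.Dict.keys_empty]; exact List.nodup_nil
  simp only [solution_alt]
  rw [PySem.Dict.items_eq_map_keys _ hnd []]
  rw [List.foldl_map]
  rw [hkeys]
  apply PySem.List.foldl_congr_mem
  intro acc L _
  rw [hget banned L, hget user_id L]
  have hm : PySem.Set.ofList ((user_id.filter (fun u => PySem.Str.len u == L)).filter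
      (fun u => (banned.filter (fun b => PySem.Str.len b == L)).any (fun p => matchPat p u)))
      = musers user_id banned L := rfl
  rw [hm]
  rfl

-- ===== VERDICT (by name: the statement is the Claim_ definition above) =====
theorem solution_spec : Claim_equal_solution := by
  intro user_id banned_id _
  unfold Spec_solution
  rw [solA, solB]
  have hcong :
      List.foldl (fun a L => if (musers user_id banned_id L).isEmpty then a
          else a * pyComb (((musers user_id banned_id L).length : Nat) : Int)
                          (((patsL banned_id L).length : Nat) : Int)) 1
        (PySem.Set.ofList (banned_id.map PySem.Str.len))
      = List.foldl (fun a L => if (!(musers user_id banned_id L).isEmpty) = true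
          then a * pyComb (((musers user_id banned_id L).length : Nat) : Int)
                          (((patsL banned_id L).length : Nat) : Int)
          else a) 1 (PySem.Set.ofList (banned_id.map PySem.Str.len)) :=
    PySem.List.foldl_congr_mem _ _ _ 1
      (fun a L _ => by by_cases h : (musers user_id banned_id L).isEmpty <;> simp [h])
  rw [hcong]
  rw [PySem.List.foldl_if_eq_foldl_filter]
  rw [foldl_mul, foldl_mul]
  simp only [one_mul]
  have hfac : ∀ L : Int,
      pyComb ((List.count L ((ansS user_id banned_id).map PySem.Str.len) : Nat) : Int)
             ((List.count L (banned_id.map PySem.Str.len) : Nat) : Int)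
      = pyComb (((musers user_id banned_id L).length : Nat) : Int)
               (((patsL banned_id L).length : Nat) : Int) := by
    intro L; rw [count_eq, bancount_eq]
  simp only [hfac]
  apply List.Perm.prod_eq
  apply List.Perm.map
  rw [List.perm_ext_iff_of_nodup (PySem.Set.nodup_ofList _)
        (List.Nodup.filter _ (PySem.Set.nodup_ofList _))]
  intro L
  rw [List.mem_filter, PySem.Set.mem_ofList, PySem.Set.mem_ofList]
  simp only [List.mem_map]
  constructor
  · rintro ⟨u, hu, rfl⟩
    obtain ⟨hum, b, hb, hc⟩ := (mem_ansS _ _ u).mp hu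
    obtain ⟨hbl, hmp⟩ := (condA_iff b u).mp hc
    have humL : u ∈ musers user_id banned_id (PySem.Str.len u) :=
      (mem_musers _ _ _ u).mpr ⟨hum, rfl, b, hb, hbl, hmp⟩
    have hne : (musers user_id banned_id (PySem.Str.len u)).isEmpty = false := by
      rcases h : (musers user_id banned_id (PySem.Str.len u)).isEmpty with _ | _
      · rfl
      · rw [List.isEmpty_iff] at h
        rw [h] at humL
        cases humL
    exact ⟨⟨b, hb, hbl⟩, by rw [hne]; decide⟩
  · rintro ⟨⟨b, hb, hbl⟩, hne⟩
    have hnil : musers user_id banned_id L ≠ [] := by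
      intro h
      rw [h] at hne
      simp at hne
    obtain ⟨u, hu⟩ := List.exists_mem_of_ne_nil _ hnil
    obtain ⟨hum, hL, b', hb', hbl', hmp⟩ := (mem_musers _ _ _ u).mp hu
    refine ⟨u, ?_, hL⟩
    exact (mem_ansS _ _ u).mpr ⟨hum, b', hb', (condA_iff b' u).mpr ⟨hbl'.trans hL.symm, hmp⟩⟩
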